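-- pv_equiv track=rewrite | github.com/TradingLabXYZ/Utilities | extract_etherscan_txs/tx.py | replace_month
-- ===== SOURCE A (Python) =====
-- def replace_month(timestamp):
--     months = {
--         "Jan": "01",
--         "Feb": "02",
--         "Mar": "03",
--         "Apr": "04",
--         "Mai": "05",
--         "Jun": "06",
--         "Jul": "07",
--         "Aug": "08",
--         "Sep": "09",
--         "Oct": "10",
--         "Nov": "11",
--         "Dec": "12"
--     }
--     for month in months:
--         timestamp = timestamp.replace(month, months[month])
--     return timestamp
-- ===== SOURCE B (Python) =====
-- def replace_month(timestamp):
--     # Single left-to-right pass: look up each 3-char window in the month table,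
--     # instead of 12 separate full-string replace passes.
--     names = "Jan Feb Mar Apr Mai Jun Jul Aug Sep Oct Nov Dec".split()
--     months = {m: str(i + 1).zfill(2) for i, m in enumerate(names)}
--     out = []
--     i = 0
--     n = len(timestamp)
--     while i < n:
--         rep = months.get(timestamp[i:i+3])
--         if rep is not None:
--             out.append(rep)
--             i += 3
--         else:
--             out.append(timestamp[i])
--             i += 1
--     return "".join(out)
-- ===== Notes on version B (the rewrite author's own statement) =====
-- stated objective: alternative
-- what changed: B makes one left-to-right pass over the string, looking up each 3-character window in the month dict, instead of A's 12 sequential full-string str.replace passes; equivalence holds because the month tokens are 3 letters, cannot overlap (upper/lower-case disjointness) and the digit replacements can never create or start a new match. (Fewer passes asymptotically, but A's passes run in C, so B is not faster in CPython.)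
import Mathlib
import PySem

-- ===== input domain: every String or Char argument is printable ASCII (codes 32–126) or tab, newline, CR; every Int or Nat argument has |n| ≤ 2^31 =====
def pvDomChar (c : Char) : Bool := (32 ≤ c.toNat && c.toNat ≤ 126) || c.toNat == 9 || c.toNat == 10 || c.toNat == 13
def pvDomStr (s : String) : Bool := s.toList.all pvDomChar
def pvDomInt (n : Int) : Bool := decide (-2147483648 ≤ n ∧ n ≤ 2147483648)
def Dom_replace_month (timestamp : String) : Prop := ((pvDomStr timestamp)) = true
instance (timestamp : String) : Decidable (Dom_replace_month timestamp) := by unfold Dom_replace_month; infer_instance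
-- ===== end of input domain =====

-- B replaces A's 12 sequential full-string str.replace passes by ONE left-to-right pass that
-- looks up each 3-character window in the month table (objective: alternative single-pass algorithm).

-- ===== PORT A =====
-- the dict literal (identical in A and in Source B), as an association list in insertion
-- order; its keys are distinct, so `months[month]` in A's loop is the value paired with `month`.
def pvMonths : List (String × String) :=
  [("Jan","01"),("Feb","02"),("Mar","03"),("Apr","04"),("Mai","05"),("Jun","06"),
   ("Jul","07"),("Aug","08"),("Sep","09"),("Oct","10"),("Nov","11"),("Dec","12")]

-- for month in months: timestamp = timestamp.replace(month, months[month])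
def replace_month (timestamp : String) : String :=
  pvMonths.foldl (fun ts p => PySem.Str.replace ts p.1 p.2) timestamp

-- ===== PORT B =====
-- names = "Jan ... Dec".split(); months = {m: str(i + 1).zfill(2) for i, m in enumerate(names)}
def pvNamesB : List String := PySem.Str.split₀ "Jan Feb Mar Apr Mai Jun Jul Aug Sep Oct Nov Dec"

def pvMonthsBuilt : List (String × String) :=
  pvNamesB.zipIdx.map (fun p => (p.1, PySem.Str.zfill (PySem.Int.toStr ((p.2 : Int) + 1)) 2))

-- Source B's while-loop over index i; the remainder of the string from i is (c :: t),
-- so timestamp[i:i+3] is c :: t.take 2; months.get(key) is first-match lookup in the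
-- association list; `i += 3` skips the matched window, `i += 1` keeps one char.
def pvGoB (d : List (String × String)) : List Char → List Char
  | [] => []
  | c :: t =>
    match (d.find? (fun p => p.1 == String.ofList (c :: t.take 2))).map Prod.snd with
    | some rep => rep.toList ++ pvGoB d (t.drop 2)
    | none => c :: pvGoB d t
termination_by l => l.length
decreasing_by
  all_goals (simp [List.length_drop]; try omega)

-- "".join(out)
def replace_month_alt (timestamp : String) : String :=
  String.ofList (pvGoB pvMonthsBuilt timestamp.toList)

-- ===== PRECONDITION & SPEC =====
def Spec_replace_month (timestamp : String) (out : String) : Prop := out = replace_month_alt timestamp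
instance (timestamp : String) (out : String) : Decidable (Spec_replace_month timestamp out) := by unfold Spec_replace_month; infer_instance

-- ===== CLAIM (what is proved, stated in full; the proofs are below) =====
def Claim_equal_replace_month : Prop := ∀ (timestamp : String), Dom_replace_month timestamp → Spec_replace_month timestamp (replace_month timestamp)

-- ===== LEMMAS AND PROOFS =====

def pvPairsL : List (List Char × List Char) :=
  pvMonths.map (fun p => (p.1.toList, p.2.toList))

def pvRepl1 (old new : List Char) : List Char → List Char
  | [] => []
  | c :: t =>
    if old.isPrefixOf (c :: t) then new ++ pvRepl1 old new (t.drop (old.length - 1))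
    else c :: pvRepl1 old new t
termination_by l => l.length
decreasing_by
  all_goals (simp [List.length_drop]; try omega)


def pvScan (ms : List (List Char × List Char)) : List Char → List Char
  | [] => []
  | c :: t =>
    match ms.find? (fun p => p.1.isPrefixOf (c :: t)) with
    | some p => p.2 ++ pvScan ms (t.drop (p.1.length - 1))
    | none => c :: pvScan ms t
termination_by l => l.length
decreasing_by
  all_goals (simp [List.length_drop]; try omega)

def pvGoodTok : List Char → Bool
  | [a, b, c] => a.isUpper && b.isLower && c.isLower
  | _ => false

def pvGoodRep (r : List Char) : Bool := r.all Char.isDigit && !r.isEmpty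

def pvGood (ms : List (List Char × List Char)) : Prop :=
  ∀ p ∈ ms, pvGoodTok p.1 = true ∧ pvGoodRep p.2 = true

-- a good token never matches at a position whose character is not an uppercase letter

theorem pvLower_not_upper (c : Char) (h : c.isLower = true) : c.isUpper = false := by
  simp only [Char.isUpper, Char.isLower, decide_eq_true_eq, Bool.and_eq_true,
    Bool.and_eq_false_iff, decide_eq_false_iff_not, UInt32.le_iff_toNat_le] at *
  have h1 : 'Z'.val.toNat = 90 := rfl
  have h2 : 'a'.val.toNat = 97 := rfl
  omega

theorem pvDigit_not_upper (c : Char) (h : c.isDigit = true) : c.isUpper = false := by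
  simp only [Char.isUpper, Char.isDigit, decide_eq_true_eq, Bool.and_eq_true,
    decide_eq_false_iff_not, UInt32.le_iff_toNat_le] at *
  have h1 : '9'.val.toNat = 57 := rfl
  have h2 : 'A'.val.toNat = 65 := rfl
  omega

theorem pvDigit_not_lower (c : Char) (h : c.isDigit = true) : c.isLower = false := by
  simp only [Char.isLower, Char.isDigit, decide_eq_true_eq, Bool.and_eq_true,
    Bool.and_eq_false_iff, decide_eq_false_iff_not, UInt32.le_iff_toNat_le] at *
  have h1 : '9'.val.toNat = 57 := rfl
  have h2 : 'a'.val.toNat = 97 := rfl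
  omega

-- a lowercase character in pvRepl1's output was a character of the input at the same spot

theorem pvGoodTok_length (m : List Char) (hm : pvGoodTok m = true) : m.length = 3 := by
  match m, hm with
  | [a, b, c], _ => rfl

theorem pvGo_eq (old new : List Char) (hold : old ≠ []) :
    ∀ (fuel : Nat) (l acc : List Char), l.length ≤ fuel →
      PySem.Chars.replace.go old new fuel l acc = acc.reverse ++ pvRepl1 old new l := by
  intro fuel
  induction fuel with
  | zero =>
    intro l acc hl
    have : l = [] := List.eq_nil_of_length_eq_zero (Nat.le_zero.mp hl)
    subst this
    simp [PySem.Chars.replace.go, pvRepl1]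
  | succ f ih =>
    intro l acc hl
    cases l with
    | nil => simp [PySem.Chars.replace.go, pvRepl1]
    | cons c t =>
      rw [PySem.Chars.replace.go]
      by_cases hp : old.isPrefixOf (c :: t) = true
      · have hpre : old <+: (c :: t) := List.isPrefixOf_iff_prefix.mp hp
        have hlen : 1 ≤ old.length := by
          cases old with
          | nil => exact absurd rfl hold
          | cons _ _ => simp
        have hle : old.length ≤ (c :: t).length := hpre.length_le
        rw [hp]
        simp only [if_true]
        rw [ih ((c :: t).drop old.length) (new.reverse ++ acc)
            (by simp [List.length_drop] at *; omega)]
        rw [pvRepl1, if_pos hp]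
        have hdrop : (c :: t).drop old.length = t.drop (old.length - 1) := by
          cases old with
          | nil => exact absurd rfl hold
          | cons _ _ => simp
        rw [hdrop]
        simp
      · rw [Bool.not_eq_true] at hp
        rw [hp]
        simp only [Bool.false_eq_true, if_false]
        rw [ih t (c :: acc) (by simp at hl; omega)]
        rw [pvRepl1, if_neg (by simp [hp])]
        simp

theorem pvReplace_eq_repl1 (s old new : List Char) (hold : old ≠ []) :
    PySem.Chars.replace s old new = pvRepl1 old new s := by
  rw [PySem.Chars.replace]
  rw [if_neg (by simp [hold])]
  simpa using pvGo_eq old new hold s.length s [] le_rfl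

theorem pvToList_foldl_replace (ms : List (String × String)) (h : ∀ p ∈ ms, p.1.toList ≠ [])
    (ts : String) :
    (ms.foldl (fun t p => PySem.Str.replace t p.1 p.2) ts).toList =
      ms.foldl (fun s p => pvRepl1 p.1.toList p.2.toList s) ts.toList := by
  induction ms generalizing ts with
  | nil => rfl
  | cons p ms ih =>
    simp only [List.foldl_cons]
    rw [ih (fun q hq => h q (List.mem_cons_of_mem _ hq))]
    congr 1
    rw [PySem.Str.toList_replace]
    exact pvReplace_eq_repl1 _ _ _ (h p (List.mem_cons_self))

theorem pvFind?_congr {α : Type} (l : List α) (p q : α → Bool) (h : ∀ x ∈ l, p x = q x) :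
    l.find? p = l.find? q := by
  induction l with
  | nil => rfl
  | cons a l ih =>
    rw [List.find?_cons, List.find?_cons, h a List.mem_cons_self,
      ih (fun x hx => h x (List.mem_cons_of_mem _ hx))]

theorem pvGoB_eq_scan (d : List (String × String)) (h : ∀ p ∈ d, p.1.toList.length = 3) :
    ∀ s, pvGoB d s = pvScan (d.map (fun p => (p.1.toList, p.2.toList))) s := by
  intro s
  induction hn : s.length using Nat.strong_induction_on generalizing s with
  | _ n ih =>
  cases s with
  | nil => rw [pvGoB, pvScan]
  | cons c t =>
    have htake : (c :: t).take 3 = c :: t.take 2 := rfl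
    rw [pvGoB, pvScan]
    have hfind : (d.map (fun p => (p.1.toList, p.2.toList))).find?
        (fun p => p.1.isPrefixOf (c :: t)) =
        ((d.find? (fun p => p.1 == String.ofList (c :: t.take 2))).map
          (fun p => (p.1.toList, p.2.toList))) := by
      rw [List.find?_map]
      congr 1
      apply pvFind?_congr
      intro p hp
      have h3 := h p hp
      simp only [Function.comp]
      rw [Bool.eq_iff_iff, List.isPrefixOf_iff_prefix, List.prefix_iff_eq_take, beq_iff_eq, h3]
      constructor
      · intro he
        apply String.ext
        rw [String.toList_ofList, he, htake]
      · intro he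
        have he2 := congrArg String.toList he
        rw [String.toList_ofList] at he2
        rw [he2, htake]
    cases hf : d.find? (fun p => p.1 == String.ofList (c :: t.take 2)) with
    | none =>
      rw [hf] at hfind
      rw [hfind]
      simp only [Option.map_none]
      subst hn
      rw [ih t.length (by simp) t rfl]
    | some p =>
      rw [hf] at hfind
      rw [hfind]
      simp only [Option.map_some]
      have h3 := h p (List.mem_of_find?_eq_some hf)
      simp only [h3]
      subst hn
      rw [ih (t.drop 2).length (by simp [List.length_drop]; try omega) (t.drop 2) rfl]

theorem pvTok_not_prefix (m : List Char) (hm : pvGoodTok m = true)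
    (c : Char) (hc : c.isUpper = false) (t : List Char) :
    m.isPrefixOf (c :: t) = false := by
  match m, hm with
  | [a, b, c'], hm =>
    simp only [pvGoodTok, Bool.and_eq_true] at hm
    rw [Bool.eq_false_iff]
    intro hpre
    have := (List.cons_prefix_cons.mp (List.isPrefixOf_iff_prefix.mp hpre)).1
    rw [this] at hm
    rw [hm.1.1] at hc
    exact Bool.true_eq_false ▸ hc

theorem pvNoTok_at_nonupper (ms : List (List Char × List Char)) (h : pvGood ms)
    (c : Char) (hc : c.isUpper = false) (t : List Char) :
    ms.find? (fun p => p.1.isPrefixOf (c :: t)) = none := by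
  rw [List.find?_eq_none]
  intro p hp
  simp only [pvTok_not_prefix p.1 (h p hp).1 c hc t, Bool.false_eq_true, not_false_eq_true]

theorem pvScan_digits (ms : List (List Char × List Char)) (h : pvGood ms)
    (r : List Char) (hr : r.all Char.isDigit = true) (x : List Char) :
    pvScan ms (r ++ x) = r ++ pvScan ms x := by
  induction r with
  | nil => rfl
  | cons d r ih =>
    simp only [List.all_cons, Bool.and_eq_true] at hr
    rw [List.cons_append, pvScan,
      pvNoTok_at_nonupper ms h d (pvDigit_not_upper d hr.1) (r ++ x), ih hr.2]
    simp

theorem pvRepl1_nonupper (m r : List Char) (hm : pvGoodTok m = true)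
    (c : Char) (hc : c.isUpper = false) (t : List Char) :
    pvRepl1 m r (c :: t) = c :: pvRepl1 m r t := by
  rw [pvRepl1, pvTok_not_prefix m hm c hc t]
  simp

theorem pvFind?_take3 (ms : List (List Char × List Char)) (h3 : ∀ p ∈ ms, p.1.length = 3)
    (s s' : List Char) (hts : s.take 3 = s'.take 3) :
    ms.find? (fun p => p.1.isPrefixOf s) = ms.find? (fun p => p.1.isPrefixOf s') := by
  apply pvFind?_congr
  intro p hp
  rw [Bool.eq_iff_iff, List.isPrefixOf_iff_prefix, List.isPrefixOf_iff_prefix,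
    List.prefix_iff_eq_take, List.prefix_iff_eq_take, h3 p hp, hts]

theorem pvRepl1_lower_cons (m r t : List Char) (y : Char) (u : List Char)
    (hr : pvGoodRep r = true) (h : pvRepl1 m r t = y :: u) (hy : y.isLower = true) :
    ∃ t', t = y :: t' ∧ pvRepl1 m r t' = u := by
  cases t with
  | nil => rw [pvRepl1] at h; exact absurd h (by simp)
  | cons t0 t1 =>
    rw [pvRepl1] at h
    by_cases hp : m.isPrefixOf (t0 :: t1) = true
    · rw [if_pos hp] at h
      simp only [pvGoodRep, Bool.and_eq_true, Bool.not_eq_eq_eq_not, Bool.not_true] at hr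
      cases r with
      | nil => exact absurd hr.2 (by simp)
      | cons d r' =>
        simp only [List.cons_append, List.cons.injEq] at h
        have hd : d.isDigit = true := by
          have := hr.1
          simp only [List.all_cons, Bool.and_eq_true] at this
          exact this.1
        rw [← h.1] at hy
        rw [pvDigit_not_lower d hd] at hy
        exact absurd hy (by simp)
    · rw [if_neg hp] at h
      simp only [List.cons.injEq] at h
      exact ⟨t1, by rw [h.1], h.2⟩

theorem pvStable (m r : List Char) (ms : List (List Char × List Char))
    (hm : pvGoodTok m = true) (hr : pvGoodRep r = true) (hms : pvGood ms)
    (c : Char) (t : List Char)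
    (hnone : ∀ p ∈ ms, p.1.isPrefixOf (c :: t) = false)
    (hm0 : m.isPrefixOf (c :: t) = false) :
    ∀ p ∈ ms, p.1.isPrefixOf (c :: pvRepl1 m r t) = false := by
  intro p hp
  obtain ⟨hgt, _⟩ := hms p hp
  rw [Bool.eq_false_iff]
  intro hpre
  match hq : p.1, hgt with
  | [x, y, z], hgt =>
    simp only [pvGoodTok, Bool.and_eq_true] at hgt
    rw [hq] at hpre
    have hpre' := List.isPrefixOf_iff_prefix.mp hpre
    obtain ⟨hxc, hrest⟩ := List.cons_prefix_cons.mp hpre'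
    obtain ⟨u, hu⟩ := hrest
    simp only [List.cons_append] at hu
    obtain ⟨t1, ht1, hrec1⟩ := pvRepl1_lower_cons m r t y (z :: u) hr hu.symm hgt.1.2
    obtain ⟨t2, ht2, _⟩ := pvRepl1_lower_cons m r t1 z u hr hrec1 hgt.2
    have : p.1.isPrefixOf (c :: t) = true := by
      rw [hq, ht1, ht2, hxc, List.isPrefixOf_iff_prefix]
      exact ⟨t2, rfl⟩
    rw [hnone p hp] at this
    exact absurd this (by simp)

theorem pvScan_nil (s : List Char) : pvScan [] s = s := by
  induction s with
  | nil => rw [pvScan]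
  | cons c t ih => rw [pvScan]; simp [ih]

theorem pvMaster (m r : List Char) (ms : List (List Char × List Char))
    (hgood : pvGood ((m, r) :: ms)) :
    ∀ s, pvScan ms (pvRepl1 m r s) = pvScan ((m, r) :: ms) s := by
  have hm : pvGoodTok m = true := (hgood (m, r) List.mem_cons_self).1
  have hr : pvGoodRep r = true := (hgood (m, r) List.mem_cons_self).2
  have hrd : r.all Char.isDigit = true := by
    have := hr; simp only [pvGoodRep, Bool.and_eq_true] at this; exact this.1
  have hms : pvGood ms := fun p hp => hgood p (List.mem_cons_of_mem _ hp)
  intro s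
  induction hn : s.length using Nat.strong_induction_on generalizing s with
  | _ n ih =>
  cases s with
  | nil => simp [pvRepl1, pvScan]
  | cons c t =>
    by_cases hp0 : m.isPrefixOf (c :: t) = true
    · -- the new token (m, r) matches here: both sides emit r and skip 3 characters
      obtain ⟨u, hu⟩ := List.isPrefixOf_iff_prefix.mp hp0
      have hlen : m.length = 3 := pvGoodTok_length m hm
      have hu2 : t.drop (m.length - 1) = u := by
        have h1 : (c :: t).drop 3 = t.drop 2 := rfl
        rw [hlen]
        have := congrArg (List.drop 3) hu
        rw [h1] at this
        rw [← this, ← hlen, List.drop_left]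
      have hulen : u.length < n := by
        have := congrArg List.length hu
        simp only [List.length_append, List.length_cons, hlen] at this
        subst hn
        simp only [List.length_cons]
        omega
      rw [pvRepl1, if_pos hp0, hu2]
      rw [pvScan_digits ms hms r hrd]
      rw [ih u.length hulen u rfl]
      conv_rhs => rw [pvScan]
      rw [List.find?_cons_of_pos (p := fun q : List Char × List Char => q.1.isPrefixOf (c :: t)) hp0]
      simp only [hu2]
    · have hp0' : m.isPrefixOf (c :: t) = false := by rw [Bool.eq_false_iff]; exact hp0
      cases hf : ms.find? (fun p => p.1.isPrefixOf (c :: t)) with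
      | some p =>
        -- an old token matches here and the new one does not: it survives the repl1 pass
        have hpmem := List.mem_of_find?_eq_some hf
        have hpt : pvGoodTok p.1 = true := (hms p hpmem).1
        have hppre : p.1.isPrefixOf (c :: t) = true := by
          have := List.find?_some hf; simpa using this
        match hq : p.1, hpt with
        | [x, y, z], hpt =>
          simp only [pvGoodTok, Bool.and_eq_true] at hpt
          rw [hq] at hppre
          obtain ⟨u, hu⟩ := List.isPrefixOf_iff_prefix.mp hppre
          simp only [List.cons_append] at hu
          obtain ⟨hcx, ht⟩ : c = x ∧ t = y :: z :: u := by
            constructor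
            · exact (List.cons.injEq .. ▸ hu).1.symm
            · exact ((List.cons.injEq .. ▸ hu).2).symm
          -- pvRepl1 leaves x :: y :: z intact
          have hskip : pvRepl1 m r (c :: t) = x :: y :: z :: pvRepl1 m r u := by
            rw [pvRepl1, if_neg (show ¬ m.isPrefixOf (c :: t) = true from hp0)]
            rw [ht, pvRepl1_nonupper m r hm y (pvLower_not_upper y hpt.1.2),
              pvRepl1_nonupper m r hm z (pvLower_not_upper z hpt.2), hcx]
          have hulen : u.length < n := by
            subst hn; rw [ht]; simp only [List.length_cons]; omega
          rw [hskip, pvScan]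
          have hfind2 : ms.find? (fun q => q.1.isPrefixOf (x :: y :: z :: pvRepl1 m r u)) =
              some p := by
            rw [pvFind?_take3 ms (fun q hq => pvGoodTok_length q.1 (hms q hq).1)
              (x :: y :: z :: pvRepl1 m r u) (c :: t) (by rw [hcx, ht]; rfl)]
            exact hf
          rw [hfind2]
          simp only [hq, List.length_cons, List.length_nil]
          have hdrop : (y :: z :: pvRepl1 m r u).drop (2 + 1 - 1) = pvRepl1 m r u := rfl
          rw [hdrop, ih u.length hulen u rfl]
          conv_rhs => rw [pvScan]
          rw [List.find?_cons_of_neg (p := fun q : List Char × List Char => q.1.isPrefixOf (c :: t)) (show ¬ m.isPrefixOf (c :: t) = true from hp0), hf]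
          simp only [hq, List.length_cons, List.length_nil]
          rw [ht]
          rfl
      | none =>
        -- no token matches here: both sides keep c and continue
        have hnone : ∀ q ∈ ms, q.1.isPrefixOf (c :: t) = false := by
          intro q hq
          have := List.find?_eq_none.mp hf q hq
          simp only [Bool.not_eq_true] at this
          exact this
        rw [pvRepl1, if_neg (show ¬ m.isPrefixOf (c :: t) = true from hp0)]
        rw [pvScan]
        have hst : ms.find? (fun q => q.1.isPrefixOf (c :: pvRepl1 m r t)) = none := by
          rw [List.find?_eq_none]
          intro q hq
          have := pvStable m r ms hm hr hms c t hnone hp0' q hq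
          simp [this]
        rw [hst]
        have htlen : t.length < n := by subst hn; simp
        rw [ih t.length htlen t rfl]
        conv_rhs => rw [pvScan]
        rw [List.find?_cons_of_neg (p := fun q : List Char × List Char => q.1.isPrefixOf (c :: t)) (show ¬ m.isPrefixOf (c :: t) = true from hp0), hf]

theorem pvFoldl_scan (ms : List (List Char × List Char)) (h : pvGood ms) (s : List Char) :
    ms.foldl (fun acc p => pvRepl1 p.1 p.2 acc) s = pvScan ms s := by
  induction ms generalizing s with
  | nil => rw [pvScan_nil]; rfl
  | cons p ms ih =>
    rw [List.foldl_cons]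
    rw [ih (fun q hq => h q (List.mem_cons_of_mem _ hq)) (pvRepl1 p.1 p.2 s)]
    exact pvMaster p.1 p.2 ms (by simpa using h) s

-- ===== VERDICT (by name: the statement is the Claim_ definition above) =====
theorem replace_month_spec : Claim_equal_replace_month := by
  intro ts _hdom
  unfold Spec_replace_month
  apply String.ext
  have hA : (replace_month ts).toList = pvScan pvPairsL ts.toList := by
    have h1 := pvToList_foldl_replace pvMonths (by decide) ts
    rw [replace_month, h1, ← List.foldl_map (f := fun p : String × String => (p.1.toList, p.2.toList))
        (g := fun s p => pvRepl1 p.1 p.2 s)]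
    exact pvFoldl_scan pvPairsL (by unfold pvGood pvPairsL pvMonths; decide) ts.toList
  have hB : (replace_month_alt ts).toList = pvScan pvPairsL ts.toList := by
    have htab : pvMonthsBuilt = pvMonths := by unfold pvMonthsBuilt pvNamesB pvMonths; decide
    rw [replace_month_alt, String.toList_ofList, htab, pvGoB_eq_scan pvMonths (by decide)]
    rfl
  rw [hA, hB]
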